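-- pv_equiv track=rewrite | github.com/bayu-siddhi/indonesia-it-law-graph-rag | src/prep/regulation_parser/parser.py | _letter_to_string_number
-- ===== SOURCE A (Python) =====
-- def _letter_to_string_number(letter: str, default: str = "00") -> str:
--     """
--     Convert an alphabetical string into a two-digit numerical representation.
--
--     This function follows an Excel-like numbering system:
--     - "A" → "01", "B" → "02", ..., "Z" → "26"
--     - "AA" → "27", "AB" → "28", ..., "CU" → "99"
--     - If the input contains non-alphabet characters, it returns the default
--         value.
--     - If the converted number exceeds 99, a ValueError is raised.
--
--     Args:
--         letter (str): The alphabetical string to convert (e.g., "A", "Z",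
--             "AA", "CU").
--         default (str, optional): The default value to return if input is
--             invalid. Defaults to "00".
--
--     Returns:
--         str: The corresponding two-digit numerical representation as a string.
--
--     Raises:
--         ValueError: If the converted number exceeds 99.
--
--     Examples:
--         - _letter_to_string_number("A") -> "01"
--         - _letter_to_string_number("Z") -> "26"
--         - _letter_to_string_number("AA") -> "27"
--         - _letter_to_string_number("CU") -> "99"
--         - _letter_to_string_number("") -> "00"
--         - _letter_to_string_number("A1") -> "00"
--         - _letter_to_string_number("XYZ") -> ValueError
--     """
--     # Return default if letter is empty
--     if not letter.isalpha():
--         return default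
--
--     result = 0
--     for char in letter:
--         result = result * 26 + (ord(char) - ord("A") + 1)
--
--     # Maximum limit 99 ("CU")
--     if result > 99:
--         raise ValueError(
--             f"Letter '{letter}' exceeds the maximum allowed value of 99 ('CU')."
--         )
--
--     return str(result).zfill(2)
-- ===== SOURCE B (Python) =====
-- def _letter_to_string_number(letter: str, default: str = "00") -> str:
--     if not letter.isalpha():
--         return default
--     if len(letter) == 1:
--         value = ord(letter) - 64
--     elif len(letter) == 2:
--         value = 26 * (ord(letter[0]) - 64) + (ord(letter[1]) - 64)
--     else:
--         value = 100  # three or more alphabetic chars always exceed 99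
--     if value > 99:
--         raise ValueError(
--             f"Letter '{letter}' exceeds the maximum allowed value of 99 ('CU')."
--         )
--     return str(value).zfill(2)
-- ===== Notes on version B (the rewrite author's own statement) =====
-- stated objective: simpler
-- what changed: Replaces A's uniform Horner loop over the string by a length dispatch with closed-form values: 1 letter -> ord-64, 2 letters -> 26*(ord0-64)+(ord1-64), 3+ letters always exceed 99 and raise.
import Mathlib
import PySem

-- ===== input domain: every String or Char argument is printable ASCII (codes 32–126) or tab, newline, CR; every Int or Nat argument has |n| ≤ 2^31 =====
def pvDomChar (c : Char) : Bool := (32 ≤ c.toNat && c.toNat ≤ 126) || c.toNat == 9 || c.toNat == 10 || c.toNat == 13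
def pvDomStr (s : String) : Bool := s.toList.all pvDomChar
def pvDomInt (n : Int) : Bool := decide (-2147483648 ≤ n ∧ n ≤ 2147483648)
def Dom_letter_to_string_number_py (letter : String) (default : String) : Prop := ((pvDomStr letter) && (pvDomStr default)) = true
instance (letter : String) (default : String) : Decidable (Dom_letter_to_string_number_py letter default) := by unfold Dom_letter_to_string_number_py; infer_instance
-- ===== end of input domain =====

-- B replaces A's uniform Horner loop by a length-dispatched closed form (1 or 2 letters; any longer
-- alphabetic input always exceeds 99 and raises): objective 'simpler', no speed claim.

-- ===== PORT A =====
def letter_to_string_number_py (letter : String) (default : String) : String :=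
  if PySem.Str.strIsalpha letter then
    let result : Int := letter.toList.foldl (fun r c => r * 26 + ((c.toNat : Int) - 65 + 1)) 0
    if result > 99 then "" -- Python raises ValueError here; excluded by Pre_
    else PySem.Str.zfill (PySem.Int.toStr result) 2
  else default

-- ===== PORT B =====
-- closed-form value of Source B's length dispatch (100 stands for "three or more letters")
def pvValue2 (cs : List Char) : Int :=
  match cs with
  | [a] => (a.toNat : Int) - 64
  | [a, b] => 26 * ((a.toNat : Int) - 64) + ((b.toNat : Int) - 64)
  | _ => 100

def letter_to_string_number_py_alt (letter : String) (default : String) : String :=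
  if PySem.Str.strIsalpha letter then
    let value := pvValue2 letter.toList
    if value > 99 then "" -- Python raises ValueError here; excluded by Pre_
    else PySem.Str.zfill (PySem.Int.toStr value) 2
  else default

-- ===== PRECONDITION & SPEC =====
-- Pre_ excludes exactly the inputs on which A raises ValueError: alphabetic strings whose base-26
-- value exceeds 99 (equivalently, within the ASCII domain: length ≥ 3, or a 1/2-letter value > 99).
def Pre_letter_to_string_number_py (letter : String) (default : String) : Prop :=
  PySem.Str.strIsalpha letter = true →
    (letter.toList.length ≤ 2 ∧ pvValue2 letter.toList ≤ 99)
instance (letter : String) (default : String) : Decidable (Pre_letter_to_string_number_py letter default) := by unfold Pre_letter_to_string_number_py; infer_instance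

def pvWitness_letter_to_string_number_py : String × String := ("CU", "00")

def Spec_letter_to_string_number_py (letter : String) (default : String) (out : String) : Prop := out = letter_to_string_number_py_alt letter default
instance (letter : String) (default : String) (out : String) : Decidable (Spec_letter_to_string_number_py letter default out) := by unfold Spec_letter_to_string_number_py; infer_instance

-- ===== CLAIM (what is proved, stated in full; the proofs are below) =====
def Claim_equal_letter_to_string_number_py : Prop := ∀ (letter : String) (default : String), Dom_letter_to_string_number_py letter default → Pre_letter_to_string_number_py letter default → Spec_letter_to_string_number_py letter default (letter_to_string_number_py letter default)

-- ===== LEMMAS AND PROOFS =====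
theorem pvFold_eq_value2 (cs : List Char) (h : cs.length ≤ 2) :
    cs.foldl (fun r c => r * 26 + ((c.toNat : Int) - 65 + 1)) 0 = pvValue2 cs ∨ cs = [] := by
  match cs with
  | [] => exact Or.inr rfl
  | [a] => left; simp [pvValue2, List.foldl]; ring
  | [a, b] => left; simp [pvValue2, List.foldl]; ring
  | a :: b :: c :: t => simp at h

-- ===== VERDICT (by name: the statement is the Claim_ definition above) =====
theorem letter_to_string_number_py_spec : Claim_equal_letter_to_string_number_py := by
  intro letter default _ hpre
  unfold Spec_letter_to_string_number_py letter_to_string_number_py letter_to_string_number_py_alt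
  by_cases h : PySem.Chars.strIsalpha letter.toList = true
  · obtain ⟨hlen, hval⟩ := hpre (by simpa [PySem.Str.strIsalpha] using h)
    rcases pvFold_eq_value2 letter.toList hlen with heq | hnil
    · simp [h, heq]
    · rw [hnil] at h
      simp [PySem.Chars.strIsalpha] at h
  · simp [h]
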